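-- pv_equiv track=rewrite | github.com/TalalZoabi/AI-LAB | tests/gep_test.py | calc_needed_terminals
-- ===== SOURCE A (Python) =====
-- TERMINALS = ['x'] + [str(i) for i in range(10)]
--
-- def calc_needed_terminals(chromosome: list[str]) -> int:
--     stack_size = 0
--     missing = 0
--     for gene in reversed(chromosome):
--         if gene in TERMINALS:
--             stack_size += 1
--         else:
--             stack_size -= 2
--             if stack_size < 0:
--                 missing += -stack_size
--                 stack_size = 0
--             stack_size += 1
--     return missing
-- ===== SOURCE B (Python) =====
-- TERMINALS = ['x'] + [str(i) for i in range(10)]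
--
-- def calc_needed_terminals(chromosome: list[str]) -> int:
--     # Build the per-step balance deltas of the reversed token stream,
--     # then return the negated minimum running balance.
--     deltas = []
--     for gene in reversed(chromosome):
--         if gene in TERMINALS:
--             deltas.append(1)
--         else:
--             deltas.extend((-2, 1))
--     s = 0
--     min_balance = 0
--     for d in deltas:
--         s += d
--         if s < min_balance:
--             min_balance = s
--     return -min_balance
-- ===== Notes on version B (the rewrite author's own statement) =====
-- stated objective: alternative
-- what changed: Replaces A's clamp-and-accumulate stack simulation with a two-pass computation: first build a balance-delta list from the reversed tokens (1 per terminal, -2 then 1 per operator), then return the negated minimum running prefix sum of that list.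
import Mathlib
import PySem

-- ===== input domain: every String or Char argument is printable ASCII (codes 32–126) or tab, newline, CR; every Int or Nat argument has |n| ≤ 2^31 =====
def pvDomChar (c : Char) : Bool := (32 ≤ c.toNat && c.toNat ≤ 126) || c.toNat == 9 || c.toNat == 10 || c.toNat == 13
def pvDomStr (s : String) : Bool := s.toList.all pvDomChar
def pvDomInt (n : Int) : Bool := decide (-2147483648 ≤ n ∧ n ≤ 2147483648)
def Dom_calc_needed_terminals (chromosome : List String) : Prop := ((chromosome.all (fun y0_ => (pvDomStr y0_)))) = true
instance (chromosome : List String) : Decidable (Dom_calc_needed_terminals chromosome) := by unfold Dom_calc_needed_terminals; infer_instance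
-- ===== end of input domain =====

-- B replaces A's clamp-and-accumulate stack with a two-pass delta-list / prefix-minimum computation (objective: alternative).

-- ===== PORT A =====
def pvTERMINALS : List String := ["x", "0", "1", "2", "3", "4", "5", "6", "7", "8", "9"]

-- one iteration of A's loop body on the state (stack_size, missing)
def pvStepA (st : Int × Int) (gene : String) : Int × Int :=
  if gene ∈ pvTERMINALS then (st.1 + 1, st.2)
  else
    let s := st.1 - 2
    let (s, m) := if s < 0 then ((0 : Int), st.2 + (-s)) else (s, st.2)
    (s + 1, m)

def calc_needed_terminals (chromosome : List String) : Int :=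
  (chromosome.reverse.foldl pvStepA (0, 0)).2

-- ===== PORT B =====
def pvDeltas (chromosome : List String) : List Int :=
  chromosome.reverse.foldl
    (fun acc gene => if gene ∈ pvTERMINALS then acc ++ [1] else acc ++ [-2, 1]) []

-- one iteration of B's second loop on the state (s, min_balance)
def pvStepB (st : Int × Int) (d : Int) : Int × Int :=
  let s := st.1 + d
  (s, if s < st.2 then s else st.2)

def calc_needed_terminals_alt (chromosome : List String) : Int :=
  -((pvDeltas chromosome).foldl pvStepB (0, 0)).2

-- ===== PRECONDITION & SPEC =====
def Spec_calc_needed_terminals (chromosome : List String) (out : Int) : Prop := out = calc_needed_terminals_alt chromosome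
instance (chromosome : List String) (out : Int) : Decidable (Spec_calc_needed_terminals chromosome out) := by unfold Spec_calc_needed_terminals; infer_instance

-- ===== CLAIM (what is proved, stated in full; the proofs are below) =====
def Claim_equal_calc_needed_terminals : Prop := ∀ (chromosome : List String), Dom_calc_needed_terminals chromosome → Spec_calc_needed_terminals chromosome (calc_needed_terminals chromosome)

-- ===== LEMMAS AND PROOFS =====

-- the delta list is built by appending; rewrite it as a flatMap for structural reasoning
theorem pvDeltas_foldl (l : List String) (acc : List Int) :
    l.foldl (fun acc gene => if gene ∈ pvTERMINALS then acc ++ [1] else acc ++ [-2, 1]) acc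
      = acc ++ l.flatMap (fun gene => if gene ∈ pvTERMINALS then [1] else [-2, 1]) := by
  induction l generalizing acc with
  | nil => simp
  | cons g t ih =>
      simp only [List.foldl_cons, List.flatMap_cons, ih]
      by_cases h : g ∈ pvTERMINALS <;> simp [h]

-- invariant linking A's (stack_size, missing) to B's (s, min_balance):
-- stack_size = s - min_balance, missing = -min_balance, with min_balance ≤ 0 and min_balance ≤ s
theorem pvLoop_inv (l : List String) :
    ∀ (s m : Int), m ≤ 0 → m ≤ s →
      l.foldl pvStepA (s - m, -m)
        = (let (s', m') := (l.flatMap (fun gene => if gene ∈ pvTERMINALS then [1] else [-2, 1])).foldl pvStepB (s, m)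
           (s' - m', -m')) := by
  induction l with
  | nil => intro s m _ _; simp
  | cons g t ih =>
      intro s m hm0 hms
      by_cases h : g ∈ pvTERMINALS
      · have h1 : pvStepA (s - m, -m) g = (s + 1 - m, -m) := by
          simp [pvStepA, h]; ring
        have h2 : pvStepB (s, m) 1 = (s + 1, m) := by
          simp [pvStepB]; omega
        simp only [List.foldl_cons, List.flatMap_cons, h, if_pos, List.foldl_append,
          List.foldl_cons, List.foldl_nil, h1, h2]
        exact ih (s + 1) m hm0 (by omega)
      · simp only [List.foldl_cons, List.flatMap_cons, if_neg h, List.foldl_append,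
          List.foldl_cons, List.foldl_nil]
        by_cases hc : s - 2 < m
        · -- A clamps: new stack = 1, new missing = -(s-2); B's min drops to s-2
          have hA : pvStepA (s - m, -m) g = (1, -(s - 2)) := by
            simp only [pvStepA, if_neg h]
            have : s - m - 2 < 0 := by omega
            simp [this]; omega
          have hB : pvStepB (pvStepB (s, m) (-2)) 1 = (s - 1, s - 2) := by
            simp only [pvStepB]
            have h1 : s + -2 < m := by omega
            simp [h1]; omega
          rw [hA, hB]
          have := ih (s - 1) (s - 2) (by omega) (by omega)
          have e1 : s - 1 - (s - 2) = (1 : Int) := by ring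
          rw [e1] at this
          exact this
        · -- no clamp: stack stays nonnegative, B's min unchanged
          have hA : pvStepA (s - m, -m) g = (s - 1 - m, -m) := by
            simp only [pvStepA, if_neg h]
            have : ¬ (s - m - 2 < 0) := by omega
            simp [this]; ring
          have hB : pvStepB (pvStepB (s, m) (-2)) 1 = (s - 1, m) := by
            simp only [pvStepB]
            have h1 : ¬ (s + -2 < m) := by omega
            simp [h1]; omega
          rw [hA, hB]
          exact ih (s - 1) m hm0 (by omega)

-- ===== VERDICT (by name: the statement is the Claim_ definition above) =====
theorem calc_needed_terminals_spec : Claim_equal_calc_needed_terminals := by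
  intro chromosome _
  unfold Spec_calc_needed_terminals calc_needed_terminals calc_needed_terminals_alt pvDeltas
  rw [pvDeltas_foldl]
  have := pvLoop_inv chromosome.reverse 0 0 le_rfl le_rfl
  simp only [sub_zero, neg_zero] at this
  rw [this]
  simp only [List.nil_append]
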